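-- pv_equiv track=rewrite | github.com/cehr123/DiFaRL | BloodPressureSim/data-prep/datagen.py | convert_factored_action
-- ===== SOURCE A (Python) =====
-- def convert_factored_action(a, nAj_all):
--     subactions = []
--     for j in range(len(nAj_all)):
--         _A_j = nAj_all[j]
--         a_j = a % _A_j
--         subactions.append(a_j)
--         a = a // _A_j
--     return subactions
-- ===== SOURCE B (Python) =====
-- def convert_factored_action(a, nAj_all):
--     # Pass 1: chain of successive floor-quotients q_0=a, q_{j+1} = q_j // n_j.
--     quots = [a]
--     q = a
--     for n in nAj_all:
--         q = q // n
--         quots.append(q)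
--     # Pass 2: each remainder recovered arithmetically: a % n == a - n*(a // n).
--     return [q - n * q2 for n, (q, q2) in zip(nAj_all, zip(quots, quots[1:]))]
-- ===== Notes on version B (the rewrite author's own statement) =====
-- stated objective: alternative
-- what changed: Replaced the single running-quotient loop doing % and // per step by two differently-shaped passes: first build the full chain of successive floor-quotients, then recover every remainder arithmetically as q - n*q_next (no modulo at all).
import Mathlib
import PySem

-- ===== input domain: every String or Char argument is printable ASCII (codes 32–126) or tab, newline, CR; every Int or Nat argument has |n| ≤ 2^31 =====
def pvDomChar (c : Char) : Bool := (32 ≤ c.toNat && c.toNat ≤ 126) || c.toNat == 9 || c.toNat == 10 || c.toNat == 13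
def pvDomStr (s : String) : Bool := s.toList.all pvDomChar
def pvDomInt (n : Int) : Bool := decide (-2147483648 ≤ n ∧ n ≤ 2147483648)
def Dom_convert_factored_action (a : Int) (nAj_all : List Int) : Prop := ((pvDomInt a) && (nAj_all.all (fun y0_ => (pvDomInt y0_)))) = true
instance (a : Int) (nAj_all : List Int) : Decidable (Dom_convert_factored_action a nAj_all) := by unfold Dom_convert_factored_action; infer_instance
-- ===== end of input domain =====

-- B replaces A's single running-quotient loop (% and // per step) by two passes:
-- build the quotient chain, then recover remainders as q - n*q_next (objective: alternative).

-- ===== PORT A =====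
-- A: for j in range(len(nAj_all)): _A_j = nAj_all[j]; subactions.append(a % _A_j); a = a // _A_j
-- j drawn from range(len) is always in range, so pyGetD with default 0 is exact here.
def convert_factored_action (a : Int) (nAj_all : List Int) : List Int :=
  ((PySem.List.pyRange 0 (PySem.List.len nAj_all) 1).foldl
    (fun (st : List Int × Int) j =>
      (st.1 ++ [PySem.Int.mod st.2 (PySem.List.pyGetD nAj_all j 0)],
       PySem.Int.floordiv st.2 (PySem.List.pyGetD nAj_all j 0)))
    ([], a)).1

-- ===== PORT B =====
-- Pass 1 of Source B: quots = [a]; for n in nAj_all: q = q // n; quots.append(q)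
def cfaQuots : Int → List Int → List Int
  | a, [] => [a]
  | a, n :: ns => a :: cfaQuots (PySem.Int.floordiv a n) ns

-- Pass 2 of Source B: [q - n * q2 for n, (q, q2) in zip(nAj_all, zip(quots, quots[1:]))]
-- quots is always nonempty, so quots[1:] = drop 1 exactly.
def convert_factored_action_alt (a : Int) (nAj_all : List Int) : List Int :=
  let quots := cfaQuots a nAj_all
  List.zipWith (fun n (qq : Int × Int) => qq.1 - n * qq.2) nAj_all (quots.zip (quots.drop 1))

-- ===== PRECONDITION & SPEC =====
-- Pre_ excludes exactly the inputs where the Python A raises ZeroDivisionError (a zero radix).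
def Pre_convert_factored_action (a : Int) (nAj_all : List Int) : Prop := (0 : Int) ∉ nAj_all
instance (a : Int) (nAj_all : List Int) : Decidable (Pre_convert_factored_action a nAj_all) := by unfold Pre_convert_factored_action; infer_instance
def pvWitness_convert_factored_action : Int × List Int := (11, [2, 3, 5])

def Spec_convert_factored_action (a : Int) (nAj_all : List Int) (out : List Int) : Prop := out = convert_factored_action_alt a nAj_all
instance (a : Int) (nAj_all : List Int) (out : List Int) : Decidable (Spec_convert_factored_action a nAj_all out) := by unfold Spec_convert_factored_action; infer_instance

-- ===== CLAIM (what is proved, stated in full; the proofs are below) =====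
def Claim_equal_convert_factored_action : Prop := ∀ (a : Int) (nAj_all : List Int), Dom_convert_factored_action a nAj_all → Pre_convert_factored_action a nAj_all → Spec_convert_factored_action a nAj_all (convert_factored_action a nAj_all)

-- ===== LEMMAS AND PROOFS =====

-- proof-only intermediate: the straightforward remainder chain both ports compute
def cfaChain : Int → List Int → List Int
  | _, [] => []
  | a, n :: ns => PySem.Int.mod a n :: cfaChain (PySem.Int.floordiv a n) ns

lemma cfa_foldl_chain (ns : List Int) (acc : List Int) (a : Int) :
    (ns.foldl
      (fun (st : List Int × Int) x =>
        (st.1 ++ [PySem.Int.mod st.2 x], PySem.Int.floordiv st.2 x))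
      (acc, a)).1 = acc ++ cfaChain a ns := by
  induction ns generalizing acc a with
  | nil => simp [cfaChain]
  | cons n ns ih => simp [List.foldl_cons, ih, cfaChain]

lemma cfa_mod_sub (a n : Int) : a - n * PySem.Int.floordiv a n = PySem.Int.mod a n := by
  have h := PySem.Int.floordiv_mul_add_mod a n
  linarith [h, mul_comm n (PySem.Int.floordiv a n)]

lemma cfa_alt_chain (ns : List Int) (a : Int) :
    List.zipWith (fun n (qq : Int × Int) => qq.1 - n * qq.2) ns
      ((cfaQuots a ns).zip ((cfaQuots a ns).drop 1)) = cfaChain a ns := by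
  induction ns generalizing a with
  | nil => simp [cfaQuots, cfaChain]
  | cons n ns ih =>
    cases ns with
    | nil => simp [cfaQuots, cfaChain, cfa_mod_sub]
    | cons m ms =>
      simp only [cfaQuots, cfaChain, List.drop_succ_cons, List.drop_zero,
        List.zip_cons_cons, List.zipWith_cons_cons, cfa_mod_sub]
      exact congrArg _ (ih (PySem.Int.floordiv a n))

-- ===== VERDICT (by name: the statement is the Claim_ definition above) =====
theorem convert_factored_action_spec : Claim_equal_convert_factored_action := by
  intro a ns _ _
  show convert_factored_action a ns = convert_factored_action_alt a ns
  unfold convert_factored_action convert_factored_action_alt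
  rw [show PySem.List.len ns = ((ns.length : Int)) from rfl,
    PySem.List.foldl_pyRange_zero_pyGetD' ns 0
      (fun (st : List Int × Int) x =>
        (st.1 ++ [PySem.Int.mod st.2 x], PySem.Int.floordiv st.2 x)) ([], a)]
  simpa using (cfa_foldl_chain ns [] a).trans (cfa_alt_chain ns a).symm
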